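-- pv_equiv track=rewrite | github.com/vincycode7/Software_Cost_Estimation | backend/model.py | create_range
-- ===== SOURCE A (Python) =====
-- def create_range(range_=[]):
--     encode_range,indicator = [], True
--     for idx in range(len(range_)):
--         start,indicator = (range_[idx], False) if indicator else (range_[idx]+1, False)
--         try:
--             end = range_[idx+1]
--             encode_range.append([start,end])
--         except:
--             encode_range.append([start])
--     return encode_range
-- ===== SOURCE B (Python) =====
-- def create_range(range_=[]):
--     if not range_:
--         return []
--     # Stage 1: flat boundary stream: first start, then for each later element b
--     # its role as an end (b) immediately followed by the next start (b + 1).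
--     flat = [range_[0]]
--     for b in range_[1:]:
--         flat.append(b)
--         flat.append(b + 1)
--     # Stage 2: chunk the stream into pairs (the odd tail becomes the singleton).
--     return [flat[i:i + 2] for i in range(0, len(flat), 2)]
-- ===== Notes on version B (the rewrite author's own statement) =====
-- stated objective: alternative
-- what changed: Replaces A's index loop with indicator flag and try/except boundary detection by a two-stage algorithm: first build a flat boundary stream (first start, then for each later element its end value b followed by the next start b+1), then chunk that stream into pairs, the odd tail becoming the final singleton.
import Mathlib
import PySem

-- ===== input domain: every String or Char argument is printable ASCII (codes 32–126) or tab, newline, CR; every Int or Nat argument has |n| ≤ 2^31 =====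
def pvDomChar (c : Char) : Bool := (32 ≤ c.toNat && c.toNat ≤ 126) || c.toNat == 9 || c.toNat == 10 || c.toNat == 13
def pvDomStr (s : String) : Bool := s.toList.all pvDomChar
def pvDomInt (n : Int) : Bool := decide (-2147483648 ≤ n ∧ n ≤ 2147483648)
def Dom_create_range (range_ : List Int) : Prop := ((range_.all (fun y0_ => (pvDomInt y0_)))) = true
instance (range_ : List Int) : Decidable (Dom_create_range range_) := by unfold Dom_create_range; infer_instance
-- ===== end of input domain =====

-- B builds a flat boundary stream (first start, then end b / next start b+1 for each later
-- element) and chunks it into pairs, instead of A's index loop with flag and try/except;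
-- objective: alternative (genuinely different two-stage algorithm, same cost).

-- ===== PORT A =====
-- range_[idx] is always in range (idx < len), so pyGetD is exact here;
-- range_[idx+1] may be out of range (the try/except), ported with pyGet?.
def create_range (range_ : List Int) : List (List Int) :=
  (((PySem.List.pyRange 0 range_.length 1).foldl
    (fun (st : List (List Int) × Bool) (idx : Int) =>
      let start : Int :=
        if st.2 then PySem.List.pyGetD range_ idx 0
        else PySem.List.pyGetD range_ idx 0 + 1
      match PySem.List.pyGet? range_ (idx + 1) with
      | some e => (st.1 ++ [[start, e]], false)
      | none   => (st.1 ++ [[start]], false))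
    ([], true))).1

-- ===== PORT B =====
-- range_[0] is exact via pyGetD (the list is nonempty under the guard);
-- flat[i:i+2] is PySem.List.slice; range(0, len(flat), 2) is pyRange with step 2.
def create_range_alt (range_ : List Int) : List (List Int) :=
  if range_ = [] then []
  else
    let flat : List Int :=
      (range_.drop 1).foldl (fun acc b => (acc ++ [b]) ++ [b + 1])
        [PySem.List.pyGetD range_ 0 0]
    (PySem.List.pyRange 0 (flat.length : Int) 2).map
      (fun i => PySem.List.slice flat (some i) (some (i + 2)))

-- ===== PRECONDITION & SPEC =====
def Spec_create_range (range_ : List Int) (out : List (List Int)) : Prop := out = create_range_alt range_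
instance (range_ : List Int) (out : List (List Int)) : Decidable (Spec_create_range range_ out) := by unfold Spec_create_range; infer_instance

-- ===== CLAIM (what is proved, stated in full; the proofs are below) =====
def Claim_equal_create_range : Prop := ∀ (range_ : List Int), Dom_create_range range_ → Spec_create_range range_ (create_range range_)

-- ===== LEMMAS AND PROOFS =====

/-- The common closed form: entry i of the result. -/
def pvItem (xs : List Int) (i : Nat) : List Int :=
  (if i = 0 then xs.getD i 0 else xs.getD i 0 + 1) ::
  (match xs[i+1]? with
   | some e => [e]
   | none   => [])

theorem pvA_fold (xs : List Int) : ∀ (n : Nat), n ≤ xs.length →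
    ((PySem.List.pyRange 0 n 1).foldl
      (fun (st : List (List Int) × Bool) (idx : Int) =>
        let start : Int :=
          if st.2 then PySem.List.pyGetD xs idx 0
          else PySem.List.pyGetD xs idx 0 + 1
        match PySem.List.pyGet? xs (idx + 1) with
        | some e => (st.1 ++ [[start, e]], false)
        | none   => (st.1 ++ [[start]], false))
      ([], true))
    = ((List.range n).map (pvItem xs), decide (n = 0)) := by
  intro n hn
  induction n with
  | zero => simp [PySem.List.pyRange_one_eq_nil]
  | succ m ih =>
    have h1 : ((0:Int)) ≤ (m:Int) := by positivity
    have hr : PySem.List.pyRange 0 ((m:Int)+1) 1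
        = PySem.List.pyRange 0 (m:Int) 1 ++ [(m:Int)] :=
      PySem.List.pyRange_one_succ_right h1
    rw [show ((m+1 : Nat) : Int) = (m:Int) + 1 by push_cast; ring, hr,
        List.foldl_append, ih (by omega)]
    have hget : PySem.List.pyGet? xs ((m:Int) + 1) = xs[m+1]? := by
      rw [show ((m:Int) + 1) = ((m+1 : Nat) : Int) by push_cast; ring]
      exact PySem.List.pyGet?_natCast xs (m+1)
    simp only [List.foldl_cons, List.foldl_nil, List.range_succ, List.map_append,
      List.map_cons, List.map_nil, hget]
    rcases hx : xs[m+1]? with _ | e <;>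
      rcases Nat.eq_zero_or_pos m with hm | hm
    · subst hm
      simp only [Nat.zero_add] at hx
      simp [pvItem, hx, PySem.List.pyGetD_zero, List.getD_eq_getElem?_getD]
    · have hm' : m ≠ 0 := by omega
      simp [pvItem, hx, hm', PySem.List.pyGetD_natCast, List.getD_eq_getElem?_getD]
    · subst hm
      simp only [Nat.zero_add] at hx
      simp [pvItem, hx, PySem.List.pyGetD_zero, List.getD_eq_getElem?_getD]
    · have hm' : m ≠ 0 := by omega
      simp [pvItem, hx, hm', PySem.List.pyGetD_natCast, List.getD_eq_getElem?_getD]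

theorem pvA_closed (xs : List Int) :
    create_range xs = (List.range xs.length).map (pvItem xs) := by
  unfold create_range
  rw [pvA_fold xs xs.length le_rfl]

/-- Shifting the boundary stream by one interior boundary shifts the item index. -/
theorem pvItem_shift (x b : Int) (t' : List Int) (k : Nat) :
    pvItem ((b + 1) :: t') k = pvItem (x :: b :: t') (k + 1) := by
  rcases k with _ | m
  · simp [pvItem]
  · simp [pvItem, List.getD]

/-- Chunk k of the boundary stream is item k of the closed form. -/
theorem pv_drop (k : Nat) : ∀ (x : Int) (t : List Int), k ≤ t.length →
    ((x :: t.flatMap (fun b => [b, b + 1])).drop (2 * k)).take 2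
      = pvItem (x :: t) k := by
  induction k with
  | zero =>
    intro x t _
    rcases t with _ | ⟨b, t'⟩ <;> simp [pvItem]
  | succ m ih =>
    intro x t hk
    rcases t with _ | ⟨b, t'⟩
    · simp at hk
    · have : 2 * (m + 1) = (2 * m) + 1 + 1 := by omega
      rw [this]
      simp only [List.flatMap_cons, List.cons_append, List.drop_succ_cons,
        List.nil_append]
      rw [ih (b + 1) t' (by simpa using hk), pvItem_shift x b t' m]

theorem pvB_closed (xs : List Int) :
    create_range_alt xs = (List.range xs.length).map (pvItem xs) := by
  unfold create_range_alt
  rcases xs with _ | ⟨x, t⟩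
  · simp
  · rw [if_neg (by simp)]
    have hflat : (t.foldl (fun acc b => (acc ++ [b]) ++ [b + 1])
        [PySem.List.pyGetD (x :: t) 0 0])
        = x :: t.flatMap (fun b => [b, b + 1]) := by
      rw [PySem.List.foldl_congr_mem t _ (fun acc b => acc ++ [b, b + 1]) _
            (by intro acc b _; simp),
          PySem.List.foldl_append_eq_flatMap]
      simp [PySem.List.pyGetD_zero, List.getD]
    simp only [List.drop_one, List.tail_cons, hflat]
    have hlen : ((x :: t.flatMap (fun b => [b, b + 1])).length : Int)
        = 2 * (t.length : Int) + 1 := by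
      simp; ring
    rw [hlen, PySem.List.pyRange_of_pos 0 (2 * (t.length : Int) + 1) (by norm_num)]
    have hcnt : (if (0:Int) < 2 * (t.length : Int) + 1 then
        ((2 * (t.length : Int) + 1 - 0 + 2 - 1) / 2).toNat else 0) = t.length + 1 := by
      rw [if_pos (by positivity)]
      have : (2 * (t.length : Int) + 1 - 0 + 2 - 1) = 2 * ((t.length : Int) + 1) := by ring
      rw [this, Int.mul_ediv_cancel_left _ (by norm_num)]
      omega
    rw [hcnt, List.map_map]
    simp only [List.length_cons]
    apply List.map_congr_left
    intro k hk
    have hk' : k ≤ t.length := by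
      simp only [List.mem_range] at hk; omega
    have h2k : (0:Int) + 2 * (k:Int) = ((2 * k : Nat) : Int) := by push_cast; ring
    have h2k2 : (0:Int) + 2 * (k:Int) + 2 = ((2 * k : Nat) : Int) + ((2:Nat) : Int) := by
      push_cast; ring
    simp only [Function.comp_apply]
    rw [h2k2, h2k, PySem.List.slice_natCast_add]
    exact pv_drop k x t hk'

-- ===== VERDICT (by name: the statement is the Claim_ definition above) =====
theorem create_range_spec : Claim_equal_create_range := by
  intro xs _
  unfold Spec_create_range
  rw [pvA_closed, pvB_closed]
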